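-- pv_equiv track=rewrite | github.com/whocaresustc/LeetCode-Solutions-Python | 0666. Path Sum IV.py | pathSum
-- ===== SOURCE A (Python) =====
-- def pathSum(nums):
--     """
--     :type nums: List[int]
--     :rtype: int
--     """
--     if not nums:
--         return 0
--     res = 0
--     d = {}
--     for i in range(len(nums)-1, -1, -1):
--         D, P, V = nums[i]//100, (nums[i]//10)%10, nums[i]%10
--         cnt = d.get((D+1, 2*P-1), 0) + d.get((D+1, 2*P), 0)
--         if cnt == 0:
--             cnt = 1
--         d[(D, P)] = cnt
--         res += V*cnt
--     return res
-- ===== SOURCE B (Python) =====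
-- def pathSum(nums):
--     n = len(nums)
--     nodes = [(x // 100, (x // 10) % 10, x % 10) for x in nums]
--     # pass 1: right-to-left sweep linking each node to the nearest later
--     # occurrence of each of its two child slots
--     left = [None] * n
--     right = [None] * n
--     last = {}
--     for i in range(n - 1, -1, -1):
--         D, P, _ = nodes[i]
--         left[i] = last.get((D + 1, 2 * P - 1))
--         right[i] = last.get((D + 1, 2 * P))
--         last[(D, P)] = i
--     # pass 2: leaf counts, deepest nodes first (children are always ready)
--     cnt = [0] * n
--     for i in sorted(range(n), key=lambda j: nodes[j][0], reverse=True):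
--         c = (cnt[left[i]] if left[i] is not None else 0) \
--             + (cnt[right[i]] if right[i] is not None else 0)
--         cnt[i] = c if c else 1
--     return sum(v * c for (_, _, v), c in zip(nodes, cnt))
-- ===== Notes on version B (the rewrite author's own statement) =====
-- stated objective: alternative
-- what changed: A fuses everything into one reverse pass whose dict carries leaf counts and accumulates the result on the fly; B instead builds explicit child links in a right-to-left sweep, then fills a leaf-count array processing nodes in depth-descending sorted order (order independent of list position), and finally takes a weighted sum over values and counts.
import Mathlib
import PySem

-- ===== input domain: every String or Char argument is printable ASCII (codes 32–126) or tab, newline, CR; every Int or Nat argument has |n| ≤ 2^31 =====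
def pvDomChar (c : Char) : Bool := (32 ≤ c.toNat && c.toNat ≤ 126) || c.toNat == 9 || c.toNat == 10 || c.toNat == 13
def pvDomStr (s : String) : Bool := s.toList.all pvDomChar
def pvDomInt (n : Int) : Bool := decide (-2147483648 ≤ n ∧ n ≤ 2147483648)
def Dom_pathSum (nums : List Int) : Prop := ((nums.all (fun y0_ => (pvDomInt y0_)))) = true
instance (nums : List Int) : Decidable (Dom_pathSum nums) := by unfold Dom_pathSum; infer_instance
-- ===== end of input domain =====

-- B replaces A's fused reverse pass (dict of leaf counts + running result) by three explicit
-- phases: a right-to-left child-link sweep, a depth-descending fill of a leaf-count array,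
-- and a final weighted sum; same result, different organisation (objective: alternative).


-- ===== PORT A =====
-- literal transliteration of A: a single loop over range(len(nums)-1, -1, -1) carrying the
-- dict of leaf counts and the running result; nums[i] is always in range here, so the
-- pyGetD default is never used.
def pathSum (nums : List Int) : Int :=
  if nums = [] then 0
  else
    ((PySem.List.pyRange (PySem.List.len nums - 1) (-1) (-1)).foldl
      (fun (st : PySem.Dict (Int × Int) Int × Int) i =>
        let x := PySem.List.pyGetD nums i 0
        let D := PySem.Int.floordiv x 100
        let P := PySem.Int.mod (PySem.Int.floordiv x 10) 10
        let V := PySem.Int.mod x 10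
        let cnt := st.1.getD (D + 1, 2 * P - 1) 0 + st.1.getD (D + 1, 2 * P) 0
        let cnt := if cnt = 0 then 1 else cnt
        (st.1.insert (D, P) cnt, st.2 + V * cnt))
      (PySem.Dict.empty, 0)).2

-- ===== PORT B =====
-- (D, P, V) of one encoded node, exactly Source B's decomposition
def pvDecomp (x : Int) : Int × Int × Int :=
  (PySem.Int.floordiv x 100, PySem.Int.mod (PySem.Int.floordiv x 10) 10, PySem.Int.mod x 10)

-- port of Source B.  Indices are the Nat 0..n-1 (Python's are the same nonnegative ints);
-- range(n-1,-1,-1) is (List.range n).reverse; the Python assignments left[i]=…, right[i]=…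
-- of the right-to-left sweep become consing the pair for index i onto the links list, which
-- therefore ends up in index order; the cnt list models the Python cnt array (set in place).
def pathSum_alt (nums : List Int) : Int :=
  let n := nums.length
  let nodes := nums.map pvDecomp
  -- pass 1: right-to-left sweep linking each node to the nearest later child occurrences
  let links : List (Option Nat × Option Nat) :=
    ((List.range n).reverse.foldl
      (fun (st : List (Option Nat × Option Nat) × PySem.Dict (Int × Int) Nat) i =>
        let dpv := nodes.getD i (0, 0, 0)
        ((st.2.get? (dpv.1 + 1, 2 * dpv.2.1 - 1), st.2.get? (dpv.1 + 1, 2 * dpv.2.1)) :: st.1,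
         st.2.insert (dpv.1, dpv.2.1) i))
      ([], PySem.Dict.empty)).1
  -- pass 2: leaf counts, deepest nodes first (children are always ready)
  let order := PySem.List.sorted (List.range n) (fun j => (nodes.getD j (0, 0, 0)).1) true
  let cnt : List Int :=
    order.foldl
      (fun cnt i =>
        let lr := links.getD i (none, none)
        let c := (match lr.1 with | some j => cnt.getD j 0 | none => 0)
               + (match lr.2 with | some j => cnt.getD j 0 | none => 0)
        cnt.set i (if c = 0 then 1 else c))
      (List.replicate n 0)
  (nodes.zip cnt).foldl (fun acc p => acc + p.1.2.2 * p.2) 0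

-- ===== PRECONDITION & SPEC =====
def Spec_pathSum (nums : List Int) (out : Int) : Prop := out = pathSum_alt nums
instance (nums : List Int) (out : Int) : Decidable (Spec_pathSum nums out) := by unfold Spec_pathSum; infer_instance

-- ===== CLAIM (what is proved, stated in full; the proofs are below) =====
def Claim_equal_pathSum : Prop := ∀ (nums : List Int), Dom_pathSum nums → Spec_pathSum nums (pathSum nums)

-- ===== LEMMAS AND PROOFS =====

-- (D, P) key of the node at index i
def pvKey (nums : List Int) (i : Nat) : Int × Int :=
  ((pvDecomp (nums.getD i 0)).1, (pvDecomp (nums.getD i 0)).2.1)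

-- V value of the node at index i
def pvVal (nums : List Int) (i : Nat) : Int := (pvDecomp (nums.getD i 0)).2.2

-- first index j with i ≤ j < n whose key is k
def pvFirstFrom (nums : List Int) (i : Nat) (k : Int × Int) : Option Nat :=
  (List.range nums.length).find? (fun j => decide (i ≤ j) && decide (pvKey nums j = k))

theorem pvFirstFrom_bounds {nums : List Int} {i : Nat} {k : Int × Int} {j : Nat}
    (h : pvFirstFrom nums i k = some j) : i ≤ j ∧ j < nums.length := by
  unfold pvFirstFrom at h
  have hmem := List.mem_of_find?_eq_some h
  have hp := List.find?_some h
  simp at hp hmem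
  exact ⟨hp.1, hmem⟩

-- the common specification count: number of leaf paths below index i in the link forest
def pvCnt (nums : List Int) (i : Nat) : Int :=
  let c :=
    (match hL : pvFirstFrom nums (i + 1) ((pvKey nums i).1 + 1, 2 * (pvKey nums i).2 - 1) with
     | some j => pvCnt nums j
     | none => 0)
    +
    (match hR : pvFirstFrom nums (i + 1) ((pvKey nums i).1 + 1, 2 * (pvKey nums i).2) with
     | some j => pvCnt nums j
     | none => 0)
  if c = 0 then 1 else c
termination_by nums.length - i
decreasing_by
  · have := pvFirstFrom_bounds hL; omega
  · have := pvFirstFrom_bounds hR; omega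

-- find? only depends on the predicate's values on the list
theorem pvFind?_congr {a : Type} (p q : a -> Bool) (l : List a)
    (h : forall x, x ∈ l -> p x = q x) : l.find? p = l.find? q := by
  induction l with
  | nil => rfl
  | cons y t ih =>
    simp only [List.find?_cons]
    rw [h y (by simp)]
    cases q y
    · exact ih (fun x hx => h x (by simp [hx]))
    · rfl

theorem pvFirstFrom_none (nums : List Int) (i : Nat) (k : Int × Int)
    (h : nums.length ≤ i) : pvFirstFrom nums i k = none := by
  apply List.find?_eq_none.mpr
  intro x hx
  simp only [List.mem_range] at hx
  simp
  omega

theorem pvFirstFrom_key {nums : List Int} {i : Nat} {k : Int × Int} {j : Nat}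
    (h : pvFirstFrom nums i k = some j) : pvKey nums j = k := by
  have hp := List.find?_some h
  simp at hp
  exact hp.2

theorem pvFirstFrom_self (nums : List Int) (i : Nat) (h : i < nums.length) :
    pvFirstFrom nums i (pvKey nums i) = some i := by
  unfold pvFirstFrom
  have hsplit : List.range nums.length = List.range' 0 i ++ List.range' i (nums.length - i) := by
    rw [List.range_eq_range']
    rw [show List.range' i (nums.length - i) = List.range' (0 + 1 * i) (nums.length - i) by simp]
    rw [List.range'_append]
    congr 1
    omega
  rw [hsplit, List.find?_append]
  have h1 : (List.range' 0 i).find? (fun j => decide (i ≤ j) && decide (pvKey nums j = pvKey nums i)) = none := by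
    apply List.find?_eq_none.mpr
    intro x hx
    have := List.mem_range'_1.mp hx
    simp
    omega
  rw [h1]
  have h2 : List.range' i (nums.length - i) = i :: List.range' (i + 1) (nums.length - i - 1) := by
    rw [show nums.length - i = (nums.length - i - 1) + 1 by omega, List.range'_succ]
    simp
  rw [h2]
  rw [List.find?_cons_of_pos (by simp)]
  rfl

theorem pvFirstFrom_succ (nums : List Int) (i : Nat) (k : Int × Int)
    (h : pvKey nums i ≠ k) : pvFirstFrom nums i k = pvFirstFrom nums (i + 1) k := by
  unfold pvFirstFrom
  apply pvFind?_congr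
  intro x hx
  by_cases hxi : x = i
  · subst hxi
    have h1 : ¬ (x + 1 ≤ x) := by omega
    simp [h, h1]
  · by_cases hk : pvKey nums x = k
    · simp [hk]; omega
    · simp [hk]

-- pvCnt restated without the dependent matches
theorem pvCnt_eq (nums : List Int) (i : Nat) : pvCnt nums i =
    (let c := ((pvFirstFrom nums (i + 1) ((pvKey nums i).1 + 1, 2 * (pvKey nums i).2 - 1)).map (pvCnt nums)).getD 0
             + ((pvFirstFrom nums (i + 1) ((pvKey nums i).1 + 1, 2 * (pvKey nums i).2)).map (pvCnt nums)).getD 0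
     if c = 0 then 1 else c) := by
  rw [pvCnt]
  cases hL : pvFirstFrom nums (i + 1) ((pvKey nums i).1 + 1, 2 * (pvKey nums i).2 - 1) <;>
    cases hR : pvFirstFrom nums (i + 1) ((pvKey nums i).1 + 1, 2 * (pvKey nums i).2) <;>
      simp

-- ===================== A side =====================
-- A's loop body on a Nat index
def pvStepA (nums : List Int) (st : PySem.Dict (Int × Int) Int × Int) (i : Nat) :
    PySem.Dict (Int × Int) Int × Int :=
  let cnt := st.1.getD ((pvKey nums i).1 + 1, 2 * (pvKey nums i).2 - 1) 0
           + st.1.getD ((pvKey nums i).1 + 1, 2 * (pvKey nums i).2) 0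
  let cnt := if cnt = 0 then 1 else cnt
  (st.1.insert (pvKey nums i) cnt, st.2 + pvVal nums i * cnt)

theorem pathSum_eq_fold (nums : List Int) :
    pathSum nums = ((List.range nums.length).reverse.foldl (pvStepA nums) (PySem.Dict.empty, 0)).2 := by
  by_cases h : nums = []
  · subst h; simp [pathSum]
  · rw [pathSum, if_neg h]
    have hn : ((PySem.List.len nums - 1) - (-1)).toNat = nums.length := by
      simp [PySem.List.len_eq]
    rw [PySem.List.pyRange_neg_one, hn, List.foldl_map]
    have hrev : (List.range nums.length).reverse = (List.range nums.length).map (fun k => nums.length - 1 - k) := by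
      apply List.ext_getElem <;> simp
    rw [hrev, List.foldl_map]
    refine congrArg Prod.snd (PySem.List.foldl_congr_mem _ _ _ _ ?_)
    intro acc k hk
    have hk' : k < nums.length := List.mem_range.mp hk
    have hcast : PySem.List.len nums - 1 - (k : Int) = ((nums.length - 1 - k : Nat) : Int) := by
      simp [PySem.List.len_eq]; omega
    rw [hcast, PySem.List.pyGetD_natCast]
    show (_, _) = pvStepA nums acc (nums.length - 1 - k)
    rw [pvStepA]
    simp only [pvKey, pvVal, pvDecomp, List.getD]

theorem pvLoopA (nums : List Int) : forall m, m ≤ nums.length ->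
    (forall k, (((List.range' (nums.length - m) m).reverse).foldl (pvStepA nums) (PySem.Dict.empty, 0)).1.get? k
        = (pvFirstFrom nums (nums.length - m) k).map (pvCnt nums)) ∧
    (((List.range' (nums.length - m) m).reverse).foldl (pvStepA nums) (PySem.Dict.empty, 0)).2
        = ((List.range' (nums.length - m) m).map (fun j => pvVal nums j * pvCnt nums j)).sum := by
  intro m
  induction m with
  | zero =>
    intro _
    refine ⟨fun k => ?_, by simp⟩
    simp [pvFirstFrom_none nums nums.length k le_rfl, PySem.Dict.get?_empty]
  | succ m ih =>
    intro hm
    obtain ⟨ih1, ih2⟩ := ih (by omega)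
    have hi : nums.length - m = (nums.length - (m + 1)) + 1 := by omega
    have hilt : nums.length - (m + 1) < nums.length := by omega
    set i := nums.length - (m + 1) with hidef
    rw [hi] at ih1 ih2
    have hdec : List.range' i (m + 1) = i :: List.range' (i + 1) m := List.range'_succ
    rw [hdec, List.reverse_cons, List.foldl_append, List.foldl_cons, List.foldl_nil]
    set st := (List.range' (i + 1) m).reverse.foldl (pvStepA nums) (PySem.Dict.empty, 0) with hst
    have hc1 : st.1.getD ((pvKey nums i).1 + 1, 2 * (pvKey nums i).2 - 1) 0
        = ((pvFirstFrom nums (i + 1) ((pvKey nums i).1 + 1, 2 * (pvKey nums i).2 - 1)).map (pvCnt nums)).getD 0 := by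
      rw [PySem.Dict.getD_eq_get?_getD, ih1]
    have hc2 : st.1.getD ((pvKey nums i).1 + 1, 2 * (pvKey nums i).2) 0
        = ((pvFirstFrom nums (i + 1) ((pvKey nums i).1 + 1, 2 * (pvKey nums i).2)).map (pvCnt nums)).getD 0 := by
      rw [PySem.Dict.getD_eq_get?_getD, ih1]
    have hcnt : (let cnt := st.1.getD ((pvKey nums i).1 + 1, 2 * (pvKey nums i).2 - 1) 0
                        + st.1.getD ((pvKey nums i).1 + 1, 2 * (pvKey nums i).2) 0
                 if cnt = 0 then 1 else cnt) = pvCnt nums i := by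
      rw [hc1, hc2, pvCnt_eq]
    constructor
    · intro k
      show (st.1.insert (pvKey nums i) _).get? k = _
      rw [PySem.Dict.get?_insert]
      by_cases hk : k = pvKey nums i
      · subst hk
        rw [if_pos rfl, pvFirstFrom_self nums i hilt]
        simp only [Option.map_some]
        exact congrArg some hcnt
      · rw [if_neg hk, ih1, pvFirstFrom_succ nums i k (fun hh => hk hh.symm)]
    · show st.2 + pvVal nums i * _ = _
      rw [ih2, List.map_cons, List.sum_cons, hcnt]
      ring

-- ===================== B side =====================
-- B's pass-1 body on a Nat index
def pvStepL (nums : List Int)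
    (st : List (Option Nat × Option Nat) × PySem.Dict (Int × Int) Nat) (i : Nat) :
    List (Option Nat × Option Nat) × PySem.Dict (Int × Int) Nat :=
  ((st.2.get? ((pvKey nums i).1 + 1, 2 * (pvKey nums i).2 - 1),
    st.2.get? ((pvKey nums i).1 + 1, 2 * (pvKey nums i).2)) :: st.1,
   st.2.insert (pvKey nums i) i)

-- the child-link list B's pass 1 produces
def pvLinks (nums : List Int) : List (Option Nat × Option Nat) :=
  (List.range nums.length).map (fun i =>
    (pvFirstFrom nums (i + 1) ((pvKey nums i).1 + 1, 2 * (pvKey nums i).2 - 1),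
     pvFirstFrom nums (i + 1) ((pvKey nums i).1 + 1, 2 * (pvKey nums i).2)))

theorem pvLoopL (nums : List Int) : forall m, m ≤ nums.length ->
    (((List.range' (nums.length - m) m).reverse).foldl (pvStepL nums) ([], PySem.Dict.empty)).1
        = (List.range' (nums.length - m) m).map (fun i =>
            (pvFirstFrom nums (i + 1) ((pvKey nums i).1 + 1, 2 * (pvKey nums i).2 - 1),
             pvFirstFrom nums (i + 1) ((pvKey nums i).1 + 1, 2 * (pvKey nums i).2))) ∧
    (forall k, (((List.range' (nums.length - m) m).reverse).foldl (pvStepL nums) ([], PySem.Dict.empty)).2.get? k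
        = pvFirstFrom nums (nums.length - m) k) := by
  intro m
  induction m with
  | zero =>
    intro _
    refine ⟨by simp, fun k => ?_⟩
    simp [pvFirstFrom_none nums nums.length k le_rfl, PySem.Dict.get?_empty]
  | succ m ih =>
    intro hm
    obtain ⟨ih1, ih2⟩ := ih (by omega)
    have hi : nums.length - m = (nums.length - (m + 1)) + 1 := by omega
    have hilt : nums.length - (m + 1) < nums.length := by omega
    set i := nums.length - (m + 1) with hidef
    rw [hi] at ih1 ih2
    have hdec : List.range' i (m + 1) = i :: List.range' (i + 1) m := List.range'_succ
    rw [hdec, List.reverse_cons, List.foldl_append, List.foldl_cons, List.foldl_nil]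
    set st := (List.range' (i + 1) m).reverse.foldl (pvStepL nums) ([], PySem.Dict.empty) with hst
    constructor
    · show (st.2.get? _, st.2.get? _) :: st.1 = _
      rw [List.map_cons, ih1, ih2, ih2]
    · intro k
      show (st.2.insert (pvKey nums i) i).get? k = _
      rw [PySem.Dict.get?_insert]
      by_cases hk : k = pvKey nums i
      · subst hk
        rw [if_pos rfl, pvFirstFrom_self nums i hilt]
      · rw [if_neg hk, ih2, pvFirstFrom_succ nums i k (fun hh => hk hh.symm)]

-- B's pass-2 body, with the links already identified
def pvStepC (nums : List Int) (cnt : List Int) (i : Nat) : List Int :=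
  let lr := (pvLinks nums).getD i (none, none)
  let c := (match lr.1 with | some j => cnt.getD j 0 | none => 0)
         + (match lr.2 with | some j => cnt.getD j 0 | none => 0)
  cnt.set i (if c = 0 then 1 else c)

theorem pvLenC (nums : List Int) (l : List Nat) (cnt : List Int) :
    (l.foldl (pvStepC nums) cnt).length = cnt.length := by
  induction l generalizing cnt with
  | nil => rfl
  | cons i t ih => simp [List.foldl_cons, ih, pvStepC]

theorem pvLoopC (nums : List Int) : forall (l : List Nat) (cnt : List Int),
    cnt.length = nums.length ->
    l.Pairwise (fun a b => (pvKey nums b).1 ≤ (pvKey nums a).1) ->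
    (forall j, j < nums.length -> j ∉ l -> cnt.getD j 0 = pvCnt nums j) ->
    forall j, j < nums.length -> (l.foldl (pvStepC nums) cnt).getD j 0 = pvCnt nums j := by
  intro l
  induction l with
  | nil =>
    intro cnt hlen _ hout j hj
    exact hout j hj (by simp)
  | cons i t ih =>
    intro cnt hlen hpair hout j hj
    rcases List.pairwise_cons.mp hpair with ⟨hhead, htail⟩
    by_cases hin : i < nums.length
    case neg =>
      -- i out of range: links.getD defaults, cnt.set i is identity beyond the length
      rw [List.foldl_cons]
      have hfix : pvStepC nums cnt i = cnt := by
        rw [pvStepC]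
        exact List.set_eq_of_length_le (by omega)
      rw [hfix]
      refine ih cnt hlen htail ?_ j hj
      intro j' hj' hj'n
      refine hout j' hj' ?_
      simp only [List.mem_cons, not_or]
      exact ⟨fun h => absurd (h ▸ hj') (by omega), hj'n⟩
    case pos =>
      rw [List.foldl_cons]
      -- the value written at i is pvCnt i
      have hlinks : (pvLinks nums).getD i (none, none)
          = (pvFirstFrom nums (i + 1) ((pvKey nums i).1 + 1, 2 * (pvKey nums i).2 - 1),
             pvFirstFrom nums (i + 1) ((pvKey nums i).1 + 1, 2 * (pvKey nums i).2)) := by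
        unfold pvLinks List.getD
        rw [List.getElem?_map]
        simp [hin]
      have hchild : forall (k : Int × Int) (j' : Nat),
          k.1 = (pvKey nums i).1 + 1 ->
          pvFirstFrom nums (i + 1) k = some j' -> cnt.getD j' 0 = pvCnt nums j' := by
        intro k j' hk hfind
        have hb := pvFirstFrom_bounds hfind
        have hkey := pvFirstFrom_key hfind
        apply hout j' hb.2
        simp only [List.mem_cons, not_or]
        constructor
        · intro hji
          subst hji
          rw [hkey] at hk
          omega
        · intro hmem
          have := hhead j' hmem
          rw [hkey] at this
          omega
      have hval : pvStepC nums cnt i = cnt.set i (pvCnt nums i) := by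
        rw [pvStepC, hlinks]
        congr 1
        rw [pvCnt_eq]
        cases hL : pvFirstFrom nums (i + 1) ((pvKey nums i).1 + 1, 2 * (pvKey nums i).2 - 1) <;>
          cases hR : pvFirstFrom nums (i + 1) ((pvKey nums i).1 + 1, 2 * (pvKey nums i).2)
        · rfl
        · simp only [Option.map_some, Option.map_none, Option.getD_some, Option.getD_none]
          rw [hchild _ _ rfl hR]
        · simp only [Option.map_some, Option.map_none, Option.getD_some, Option.getD_none]
          rw [hchild _ _ rfl hL]
        · simp only [Option.map_some, Option.getD_some]
          rw [hchild _ _ rfl hL, hchild _ _ rfl hR]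
      rw [hval]
      refine ih (cnt.set i (pvCnt nums i)) ?_ htail ?_ j hj
      · simp [hlen]
      · intro j' hj' hj'n
        by_cases hji : j' = i
        · subst hji
          unfold List.getD
          rw [List.getElem?_set_self (by omega)]
          rfl
        · unfold List.getD
          rw [List.getElem?_set_ne (fun h => hji h.symm)]
          exact hout j' hj' (by simp [hji, hj'n])

-- the common value both programs compute
def pvTotal (nums : List Int) : Int :=
  ((List.range nums.length).map (fun j => pvVal nums j * pvCnt nums j)).sum

theorem pathSum_eq_total (nums : List Int) : pathSum nums = pvTotal nums := by
  rw [pathSum_eq_fold, pvTotal]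
  have h := (pvLoopA nums nums.length le_rfl).2
  rw [Nat.sub_self] at h
  rw [List.range_eq_range']
  exact h

theorem pathSum_alt_eq_total (nums : List Int) : pathSum_alt nums = pvTotal nums := by
  rw [pathSum_alt]
  have hnodes : forall i : Nat, i < nums.length ->
      (nums.map pvDecomp).getD i (0, 0, 0) = pvDecomp (nums.getD i 0) := by
    intro i hi
    unfold List.getD
    rw [List.getElem?_map, List.getElem?_eq_getElem hi]
    simp
  -- pass 1 computes exactly the link list pvLinks
  have hpass1 : ((List.range nums.length).reverse.foldl
      (fun (st : List (Option Nat × Option Nat) × PySem.Dict (Int × Int) Nat) i =>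
        let dpv := (nums.map pvDecomp).getD i (0, 0, 0)
        ((st.2.get? (dpv.1 + 1, 2 * dpv.2.1 - 1), st.2.get? (dpv.1 + 1, 2 * dpv.2.1)) :: st.1,
         st.2.insert (dpv.1, dpv.2.1) i))
      ([], PySem.Dict.empty)).1 = pvLinks nums := by
    have hcong : (List.range nums.length).reverse.foldl
        (fun (st : List (Option Nat × Option Nat) × PySem.Dict (Int × Int) Nat) i =>
          let dpv := (nums.map pvDecomp).getD i (0, 0, 0)
          ((st.2.get? (dpv.1 + 1, 2 * dpv.2.1 - 1), st.2.get? (dpv.1 + 1, 2 * dpv.2.1)) :: st.1,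
           st.2.insert (dpv.1, dpv.2.1) i))
        ([], PySem.Dict.empty)
        = (List.range nums.length).reverse.foldl (pvStepL nums) ([], PySem.Dict.empty) := by
      apply PySem.List.foldl_congr_mem
      intro acc i hi
      have hi' : i < nums.length := List.mem_range.mp (List.mem_reverse.mp hi)
      show (let dpv := (nums.map pvDecomp).getD i (0, 0, 0); _) = _
      rw [hnodes i hi', pvStepL]
      simp only [pvKey, pvDecomp]
    rw [hcong, List.range_eq_range']
    have h := (pvLoopL nums nums.length le_rfl).1
    rw [Nat.sub_self] at h
    rw [h, pvLinks, List.range_eq_range']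
  rw [hpass1]
  -- pass 2 body is pvStepC
  have hbody : (fun (cnt : List Int) (i : Nat) =>
      let lr := (pvLinks nums).getD i (none, none)
      let c := (match lr.1 with | some j => cnt.getD j 0 | none => 0)
             + (match lr.2 with | some j => cnt.getD j 0 | none => 0)
      cnt.set i (if c = 0 then 1 else c)) = pvStepC nums := by
    funext cnt i
    rfl
  rw [hbody]
  set order := PySem.List.sorted (List.range nums.length)
      (fun j => ((nums.map pvDecomp).getD j (0, 0, 0)).1) true with horder
  have hmem : forall x, x ∈ order -> x < nums.length := by
    intro x hx
    exact List.mem_range.mp ((PySem.List.sorted_perm _ _ _).mem_iff.mp hx)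
  have hpair : order.Pairwise (fun a b => (pvKey nums b).1 ≤ (pvKey nums a).1) := by
    refine List.Pairwise.imp_of_mem ?_ (PySem.List.sorted_pairwise_rev (List.range nums.length)
      (fun j => ((nums.map pvDecomp).getD j (0, 0, 0)).1))
    intro a b ha hb hle
    rwa [hnodes a (hmem a ha), hnodes b (hmem b hb)] at hle
  have hcnt := pvLoopC nums order (List.replicate nums.length 0) (by simp) hpair
    (fun j hj hnm => absurd ((PySem.List.sorted_perm _ _ _).mem_iff.mpr (List.mem_range.mpr hj)) hnm)
  set cntF := order.foldl (pvStepC nums) (List.replicate nums.length 0) with hcntF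
  have hlenF : cntF.length = nums.length := by
    rw [hcntF, pvLenC]; simp
  -- final weighted sum
  rw [PySem.List.foldl_add]
  have hzip : ((nums.map pvDecomp).zip cntF).map (fun p => p.1.2.2 * p.2)
      = (List.range nums.length).map (fun j => pvVal nums j * pvCnt nums j) := by
    apply List.ext_getElem
    · simp [hlenF]
    · intro j h1 h2
      simp only [List.length_map, List.length_zip, List.length_map, hlenF, Nat.min_self] at h1
      simp only [List.getElem_map, List.getElem_zip, List.getElem_range]
      have hj : j < nums.length := by simpa using h1
      have hc : cntF[j]'(by omega) = pvCnt nums j := by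
        rw [← List.getD_eq_getElem cntF 0 (by omega)]
        exact hcnt j hj
      rw [hc]
      congr 1
      rw [pvVal, List.getD_eq_getElem nums 0 hj]
  rw [hzip, pvTotal]
  ring

-- ===== VERDICT (by name: the statement is the Claim_ definition above) =====
theorem pathSum_spec : Claim_equal_pathSum := by
  intro nums _
  unfold Spec_pathSum
  rw [pathSum_eq_total, pathSum_alt_eq_total]
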